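-- pv_equiv track=rewrite | github.com/elevenisrising/SubGenie | src/processing/segmentation.py | try_split_at_whisper_boundaries
-- ===== SOURCE A (Python) =====
-- from typing import List, Dict
--
-- def try_split_at_whisper_boundaries(sentence: str, max_chars: int, whisper_boundaries: List[Dict], all_words: List[Dict]) -> List[str]:
--     if not whisper_boundaries or not all_words:
--         return [sentence]
--     # Build plain word list
--     word_list = [(w.get("word") or "").strip() for w in all_words]
--     word_list = [w for w in word_list if w]
--     sent_words = sentence.split()
--     # sliding window to locate sentence span
--     best_start = -1
--     for i in range(len(word_list) - len(sent_words) + 1):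
--         if word_list[i:i + len(sent_words)] == sent_words:
--             best_start = i
--             break
--     if best_start == -1:
--         return [sentence]
--     sent_end = best_start + len(sent_words) - 1
--     internal_boundaries = []
--     for b in whisper_boundaries:
--         bw = int(b.get("start_word_idx", -1))
--         if best_start < bw <= sent_end:
--             internal_boundaries.append(bw)
--     if not internal_boundaries:
--         return [sentence]
--     # cut by internal boundaries
--     parts: List[str] = []
--     cur = best_start
--     for bw in sorted(internal_boundaries):
--         part = " ".join(word_list[cur:bw]).strip()
--         if 15 <= len(part) <= max_chars:
--             parts.append(part)
--             cur = bw
--         else: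
--             # if too short, try to merge later
--             pass
--     if cur <= sent_end:
--         last = " ".join(word_list[cur:sent_end + 1]).strip()
--         if last:
--             parts.append(last)
--     # validate
--     if len(parts) > 1 and all(len(p) <= max_chars for p in parts):
--         return parts
--     return [sentence]
-- ===== SOURCE B (Python) =====
-- from typing import List, Dict
--
-- def try_split_at_whisper_boundaries(sentence: str, max_chars: int, whisper_boundaries: List[Dict], all_words: List[Dict]) -> List[str]:
--     if not whisper_boundaries or not all_words:
--         return [sentence]
--     word_list = []
--     for w in all_words:
--         t = (w.get("word") or "").strip()
--         if t:
--             word_list.append(t)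
--     sent_words = sentence.split()
--     n, m = len(word_list), len(sent_words)
--     # prefix sums of word lengths: segment character counts in O(1), no joins in the loop
--     pre = [0]
--     for t in word_list:
--         pre.append(pre[-1] + len(t))
--
--     def seg_len(a, b):  # len of " ".join(word_list[a:b]) for 0 <= a, b <= n
--         return 0 if b <= a else pre[b] - pre[a] + (b - a - 1)
--
--     best_start = -1
--     for i in range(n - m + 1):
--         if all(word_list[i + j] == w for j, w in enumerate(sent_words)):
--             best_start = i
--             break
--     if best_start == -1:
--         return [sentence]
--     sent_end = best_start + m - 1
--     bounds = [bw for bw in sorted(int(b.get("start_word_idx", -1)) for b in whisper_boundaries)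
--               if best_start < bw <= sent_end]
--     if not bounds:
--         return [sentence]
--     # first pass: choose cut indices arithmetically; materialize strings once at the end
--     cuts = [best_start]
--     for bw in bounds:
--         if 15 <= seg_len(cuts[-1], bw) <= max_chars:
--             cuts.append(bw)
--     cuts.append(sent_end + 1)
--     if len(cuts) > 2 and seg_len(cuts[-2], cuts[-1]) <= max_chars:
--         return [" ".join(word_list[a:b]) for a, b in zip(cuts, cuts[1:])]
--     return [sentence]
-- ===== Notes on version B (the rewrite author's own statement) =====
-- stated objective: alternative
-- what changed: B replaces A's per-boundary string building (join+strip+len on every candidate segment, then a final all() validation pass) by prefix sums of word lengths: segment character counts are computed arithmetically in O(1), cut indices are selected first and only the accepted segments are materialized as strings once at the end; the final validation collapses to a single check of the last segment.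
import Mathlib
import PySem

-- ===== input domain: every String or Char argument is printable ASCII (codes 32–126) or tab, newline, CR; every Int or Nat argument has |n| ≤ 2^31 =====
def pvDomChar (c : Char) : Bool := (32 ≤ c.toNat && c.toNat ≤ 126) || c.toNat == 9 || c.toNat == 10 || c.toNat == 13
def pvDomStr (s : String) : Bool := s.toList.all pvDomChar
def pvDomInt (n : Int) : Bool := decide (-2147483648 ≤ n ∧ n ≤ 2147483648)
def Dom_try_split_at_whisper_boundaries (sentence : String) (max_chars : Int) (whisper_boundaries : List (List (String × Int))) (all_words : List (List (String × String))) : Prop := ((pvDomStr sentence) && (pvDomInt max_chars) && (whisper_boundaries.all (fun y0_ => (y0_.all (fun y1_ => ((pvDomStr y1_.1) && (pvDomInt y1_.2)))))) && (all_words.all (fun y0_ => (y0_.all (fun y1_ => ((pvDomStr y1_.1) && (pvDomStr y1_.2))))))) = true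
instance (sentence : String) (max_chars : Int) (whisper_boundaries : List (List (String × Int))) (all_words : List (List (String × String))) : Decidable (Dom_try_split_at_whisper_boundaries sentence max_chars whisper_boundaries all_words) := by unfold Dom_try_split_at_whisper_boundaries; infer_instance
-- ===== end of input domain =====

-- B replaces A's per-boundary join/strip/len string building by prefix-sum arithmetic on cut
-- indices (strings are materialized once at the end); same return value, alternative algorithm.

-- ===== PORT A =====
-- (w.get("word") or "").strip()
def pvWordA (w : List (String × String)) : String :=
  PySem.Str.strip (((PySem.Dict.mk w).get? "word").getD "")

-- 'for i in range(...): if word_list[i:i+len(sent_words)] == sent_words: best_start = i; break' / else -1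
def pvFindA (wl sw : List String) : List Int → Int
  | [] => -1
  | i :: rest =>
    if PySem.List.slice wl (some i) (some (i + PySem.List.len sw)) = sw then i
    else pvFindA wl sw rest

-- body of A's 'for bw in sorted(internal_boundaries)' loop, state (parts, cur)
def pvCutA (wl : List String) (max_chars : Int) (pc : List String × Int) (bw : Int) : List String × Int :=
  let part := PySem.Str.strip (PySem.Str.join " " (PySem.List.slice wl (some pc.2) (some bw)))
  if 15 ≤ PySem.Str.len part ∧ PySem.Str.len part ≤ max_chars then (pc.1 ++ [part], bw) else pc

def try_split_at_whisper_boundaries (sentence : String) (max_chars : Int) (whisper_boundaries : List (List (String × Int))) (all_words : List (List (String × String))) : List String :=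
  if whisper_boundaries = [] ∨ all_words = [] then [sentence] else
  let word_list := (all_words.map pvWordA).filter (fun w => w ≠ "")
  let sent_words := PySem.Str.split₀ sentence
  let best_start := pvFindA word_list sent_words
    (PySem.List.pyRange 0 (PySem.List.len word_list - PySem.List.len sent_words + 1) 1)
  if best_start = -1 then [sentence] else
  let sent_end := best_start + PySem.List.len sent_words - 1
  let internal := whisper_boundaries.foldl (fun acc b =>
      let bw := (PySem.Dict.mk b).getD "start_word_idx" (-1)
      if best_start < bw ∧ bw ≤ sent_end then acc ++ [bw] else acc) []
  if internal = [] then [sentence] else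
  let pc := (PySem.List.sorted internal (fun x => x) false).foldl (pvCutA word_list max_chars) ([], best_start)
  let parts := if pc.2 ≤ sent_end then
      let last := PySem.Str.strip (PySem.Str.join " "
        (PySem.List.slice word_list (some pc.2) (some (sent_end + 1))))
      if last ≠ "" then pc.1 ++ [last] else pc.1
    else pc.1
  if 1 < parts.length ∧ parts.all (fun p => PySem.Str.len p ≤ max_chars) then parts else [sentence]

-- ===== PORT B =====
def pvWordB (w : List (String × String)) : String :=
  PySem.Str.strip (((PySem.Dict.mk w).get? "word").getD "")

-- 'all(word_list[i + j] == w for j, w in enumerate(sent_words))'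
def pvMatchB (wl : List String) (i : Int) : List String → Int → Bool
  | [], _ => true
  | w :: rest, j => if PySem.List.pyGetD wl (i + j) "" = w then pvMatchB wl i rest (j + 1) else false

def pvFindB (wl sw : List String) : List Int → Int
  | [] => -1
  | i :: rest => if pvMatchB wl i sw 0 then i else pvFindB wl sw rest

-- 'return 0 if b <= a else pre[b] - pre[a] + (b - a - 1)'
def pvSegLen (pre : List Int) (a b : Int) : Int :=
  if b ≤ a then 0 else PySem.List.pyGetD pre b 0 - PySem.List.pyGetD pre a 0 + (b - a - 1)

-- body of B's 'for bw in bounds' loop over cut indices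
def pvStepB (pre : List Int) (max_chars : Int) (cuts : List Int) (bw : Int) : List Int :=
  if 15 ≤ pvSegLen pre (PySem.List.pyGetD cuts (-1) 0) bw ∧
     pvSegLen pre (PySem.List.pyGetD cuts (-1) 0) bw ≤ max_chars
  then cuts ++ [bw] else cuts

def try_split_at_whisper_boundaries_alt (sentence : String) (max_chars : Int) (whisper_boundaries : List (List (String × Int))) (all_words : List (List (String × String))) : List String :=
  if whisper_boundaries = [] ∨ all_words = [] then [sentence] else
  let word_list := all_words.foldl (fun acc w =>
      let t := pvWordB w
      if t ≠ "" then acc ++ [t] else acc) []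
  let sent_words := PySem.Str.split₀ sentence
  let pre := word_list.foldl (fun acc t => acc ++ [PySem.List.pyGetD acc (-1) 0 + PySem.Str.len t]) [0]
  let best_start := pvFindB word_list sent_words
    (PySem.List.pyRange 0 (PySem.List.len word_list - PySem.List.len sent_words + 1) 1)
  if best_start = -1 then [sentence] else
  let sent_end := best_start + PySem.List.len sent_words - 1
  let bounds := (PySem.List.sorted (whisper_boundaries.map
        (fun b => (PySem.Dict.mk b).getD "start_word_idx" (-1))) (fun x => x) false).filter
      (fun bw => best_start < bw ∧ bw ≤ sent_end)
  if bounds = [] then [sentence] else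
  let cuts := bounds.foldl (pvStepB pre max_chars) [best_start]
  let cuts2 := cuts ++ [sent_end + 1]
  if 2 < cuts2.length ∧
     pvSegLen pre (PySem.List.pyGetD cuts2 (-2) 0) (PySem.List.pyGetD cuts2 (-1) 0) ≤ max_chars
  then (cuts2.zip (PySem.List.slice cuts2 (some 1) none)).map
        (fun ab => PySem.Str.join " " (PySem.List.slice word_list (some ab.1) (some ab.2)))
  else [sentence]

-- ===== PRECONDITION & SPEC =====
def Spec_try_split_at_whisper_boundaries (sentence : String) (max_chars : Int) (whisper_boundaries : List (List (String × Int))) (all_words : List (List (String × String))) (out : List String) : Prop := out = try_split_at_whisper_boundaries_alt sentence max_chars whisper_boundaries all_words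
instance (sentence : String) (max_chars : Int) (whisper_boundaries : List (List (String × Int))) (all_words : List (List (String × String))) (out : List String) : Decidable (Spec_try_split_at_whisper_boundaries sentence max_chars whisper_boundaries all_words out) := by unfold Spec_try_split_at_whisper_boundaries; infer_instance

-- ===== CLAIM (what is proved, stated in full; the proofs are below) =====
def Claim_equal_try_split_at_whisper_boundaries : Prop := ∀ (sentence : String) (max_chars : Int) (whisper_boundaries : List (List (String × Int))) (all_words : List (List (String × String))), Dom_try_split_at_whisper_boundaries sentence max_chars whisper_boundaries all_words → Spec_try_split_at_whisper_boundaries sentence max_chars whisper_boundaries all_words (try_split_at_whisper_boundaries sentence max_chars whisper_boundaries all_words)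

-- ===== LEMMAS AND PROOFS =====

def pvGood (cs : List Char) : Prop :=
  cs ≠ [] ∧ (∀ c, cs.head? = some c → PySem.Chars.isspace c = false) ∧
    (∀ c, cs.getLast? = some c → PySem.Chars.isspace c = false)

theorem pv_lstrip_id (cs : List Char) (h : ∀ c, cs.head? = some c → PySem.Chars.isspace c = false) :
    PySem.Chars.lstrip cs = cs := by
  cases cs with
  | nil => rfl
  | cons c t => simp [PySem.Chars.lstrip, h c rfl]

theorem pv_rstrip_id (cs : List Char) (h : ∀ c, cs.getLast? = some c → PySem.Chars.isspace c = false) :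
    PySem.Chars.rstrip cs = cs := by
  unfold PySem.Chars.rstrip
  rw [show List.dropWhile PySem.Chars.isspace cs.reverse = cs.reverse from ?_, List.reverse_reverse]
  cases hr : cs.reverse with
  | nil => rfl
  | cons c t =>
    have : cs.getLast? = some c := by rw [← List.head?_reverse, hr]; rfl
    simp [h c this]

theorem pv_strip_id (cs : List Char) (h : pvGood cs) : PySem.Chars.strip cs = cs := by
  unfold PySem.Chars.strip
  rw [pv_lstrip_id cs h.2.1, pv_rstrip_id cs h.2.2]

theorem pv_head?_dropWhile (p : Char → Bool) (l : List Char) (c : Char)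
    (h : (List.dropWhile p l).head? = some c) : p c = false := by
  have := List.head?_dropWhile_not p l
  rw [h] at this
  exact this

theorem pv_good_strip (s : List Char) (h : PySem.Chars.strip s ≠ []) : pvGood (PySem.Chars.strip s) := by
  refine ⟨h, ?_, ?_⟩
  · -- head of rstrip (lstrip s) is head of lstrip s (prefix), which fails isspace
    intro c hc
    unfold PySem.Chars.strip PySem.Chars.rstrip at hc
    set y := PySem.Chars.lstrip s with hy
    -- (dropWhile p y.reverse).reverse is a prefix of y
    have hpre : (List.dropWhile PySem.Chars.isspace y.reverse).reverse <+: y := by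
      have := List.dropWhile_suffix (l := y.reverse) PySem.Chars.isspace
      have := this.reverse
      simpa using this
    obtain ⟨t, ht⟩ := hpre
    have hne : (List.dropWhile PySem.Chars.isspace y.reverse).reverse ≠ [] := by
      unfold PySem.Chars.strip PySem.Chars.rstrip at h
      exact h
    have : y.head? = some c := by
      rw [← ht, List.head?_append_of_ne_nil _ hne, hc]
    -- y = dropWhile isspace s
    rw [hy] at this
    unfold PySem.Chars.lstrip at this
    exact pv_head?_dropWhile _ _ _ this
  · intro c hc
    unfold PySem.Chars.strip PySem.Chars.rstrip at hc
    rw [← List.head?_reverse, List.reverse_reverse] at hc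
    exact pv_head?_dropWhile _ _ _ hc

theorem pv_join_cons_cons (sep x y : List Char) (l : List (List Char)) :
    PySem.Chars.join sep (x :: y :: l) = x ++ sep ++ PySem.Chars.join sep (y :: l) := by
  simp [PySem.Chars.join, List.intercalate]

theorem pv_join_singleton (sep x : List Char) : PySem.Chars.join sep [x] = x := by
  simp [PySem.Chars.join, List.intercalate]

theorem pv_join_ne_nil (css : List (List Char)) (h0 : css ≠ []) (h : ∀ cs ∈ css, cs ≠ []) :
    PySem.Chars.join [' '] css ≠ [] := by
  match css with
  | [x] => rw [pv_join_singleton]; exact h x (by simp)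
  | x :: y :: l =>
    rw [pv_join_cons_cons]
    have := h x (by simp)
    intro hcontra
    simp only [List.append_eq_nil_iff] at hcontra
    exact this hcontra.1.1

theorem pv_len_join (css : List (List Char)) (h0 : css ≠ []) :
    (PySem.Chars.join [' '] css).length = (css.map List.length).sum + css.length - 1 := by
  match css with
  | [x] => rw [pv_join_singleton]; simp
  | x :: y :: l =>
    rw [pv_join_cons_cons]
    have ih := pv_len_join (y :: l) (by simp)
    rw [List.length_append, List.length_append, ih]
    simp only [List.map_cons, List.sum_cons, List.length_cons, List.length_nil]
    omega

theorem pv_good_join (css : List (List Char)) (h0 : css ≠ []) (h : ∀ cs ∈ css, pvGood cs) :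
    pvGood (PySem.Chars.join [' '] css) := by
  refine ⟨pv_join_ne_nil css h0 (fun cs hcs => (h cs hcs).1), ?_, ?_⟩
  · intro c hc
    match css with
    | [x] =>
      rw [pv_join_singleton] at hc
      exact (h x (by simp)).2.1 c hc
    | x :: y :: l =>
      rw [pv_join_cons_cons] at hc
      rw [List.append_assoc, List.head?_append_of_ne_nil _ (h x (by simp)).1] at hc
      exact (h x (by simp)).2.1 c hc
  · intro c hc
    match css with
    | [x] =>
      rw [pv_join_singleton] at hc
      exact (h x (by simp)).2.2 c hc
    | x :: y :: l =>
      rw [pv_join_cons_cons] at hc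
      have hne : PySem.Chars.join [' '] (y :: l) ≠ [] :=
        pv_join_ne_nil _ (by simp) (fun cs hcs => (h cs (by simp [hcs])).1)
      rw [List.getLast?_append_of_ne_nil _ hne] at hc
      exact (pv_good_join (y :: l) (by simp) (fun cs hcs => h cs (by simp [hcs]))).2.2 c hc

theorem pv_strip_join (css : List (List Char)) (h0 : css ≠ []) (h : ∀ cs ∈ css, pvGood cs) :
    PySem.Chars.strip (PySem.Chars.join [' '] css) = PySem.Chars.join [' '] css :=
  pv_strip_id _ (pv_good_join css h0 h)

-- ===== pre list =====
def pvPre (wl : List String) : List Int :=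
  wl.foldl (fun acc t => acc ++ [PySem.List.pyGetD acc (-1) 0 + PySem.Str.len t]) [0]

theorem pv_pre_spec (wl : List String) :
    pvPre wl = (List.range (wl.length + 1)).map (fun k => ((wl.take k).map PySem.Str.len).sum) := by
  induction wl using List.reverseRecOn with
  | nil => simp [pvPre]
  | append_singleton ws t ih =>
    unfold pvPre at ih ⊢
    rw [List.foldl_append, ih]
    have hne : (List.range (ws.length + 1)).map (fun k => ((ws.take k).map PySem.Str.len).sum) ≠ [] := by
      simp
    rw [List.foldl_cons, List.foldl_nil, PySem.List.pyGetD_neg_one _ _ hne]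
    rw [List.getLast_eq_getElem hne]
    simp only [List.length_map, List.length_range]
    rw [List.getElem_map, List.getElem_range]
    conv_rhs => rw [show (ws ++ [t]).length + 1 = (ws.length + 1) + 1 by simp, List.range_succ,
      List.map_append]
    congr 1
    · apply List.map_congr_left
      intro k hk
      rw [List.mem_range] at hk
      rw [List.take_append_of_le_length (by omega)]
    · simp only [List.map_cons, List.map_nil]
      congr 1
      rw [show ws.length + 1 - 1 = ws.length by omega]
      rw [show (ws ++ [t]).take (ws.length + 1) = ws ++ [t] from
        List.take_of_length_le (by simp)]
      simp

theorem pv_pre_get (wl : List String) (k : Nat) (hk : k ≤ wl.length) :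
    PySem.List.pyGetD (pvPre wl) (k : Int) 0 = ((wl.take k).map PySem.Str.len).sum := by
  rw [PySem.List.pyGetD_natCast, pv_pre_spec]
  rw [List.getD_eq_getElem _ _ (by simpa using by omega)]
  simp

-- ===== segment strings =====
theorem pv_join_toList (parts : List String) :
    (PySem.Str.join " " parts).toList = PySem.Chars.join [' '] (parts.map String.toList) := by
  rw [PySem.Str.toList_join]; rfl

theorem pv_part_strip (ws : List String) (hg : ∀ w ∈ ws, pvGood w.toList) :
    PySem.Str.strip (PySem.Str.join " " ws) = PySem.Str.join " " ws := by
  rcases ws with _ | ⟨x, t⟩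
  · decide
  · apply String.toList_inj.mp
    rw [PySem.Str.toList_strip, pv_join_toList]
    apply pv_strip_join _ (by simp)
    intro cs hcs
    rw [List.mem_map] at hcs
    obtain ⟨w, hw, rfl⟩ := hcs
    exact hg w hw

theorem pv_sum_len (ws : List String) :
    (ws.map PySem.Str.len).sum = (((ws.map String.toList).map List.length).sum : Int) := by
  induction ws with
  | nil => rfl
  | cons x t ih => simp [PySem.Str.len, ih]

theorem pv_part_len (ws : List String) (h0 : ws ≠ []) :
    PySem.Str.len (PySem.Str.join " " ws) = (ws.map PySem.Str.len).sum + ws.length - 1 := by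
  have h1 : PySem.Str.len (PySem.Str.join " " ws) = ((PySem.Str.join " " ws).toList.length : Int) := by
    simp [PySem.Str.len]
  rw [h1, pv_join_toList, pv_len_join _ (by simpa using h0), pv_sum_len]
  have hL : 1 ≤ ws.length := List.length_pos_iff.mpr h0
  simp only [List.length_map]
  omega

theorem pv_seg (wl : List String) (a b : Int)
    (h0 : 0 ≤ a) (hab : a ≤ b) (hb : b ≤ wl.length) :
    PySem.Str.len (PySem.Str.join " " (PySem.List.slice wl (some a) (some b))) =
      pvSegLen (pvPre wl) a b := by
  rcases eq_or_lt_of_le hab with rfl | hlt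
  · rw [PySem.List.slice_toNat wl h0 h0]
    simp [pvSegLen, PySem.Str.len]
  · have hb0 : 0 ≤ b := le_trans h0 hab
    rw [PySem.List.slice_toNat wl h0 hb0]
    set a' := a.toNat with ha'
    set b' := b.toNat with hb'
    have hab' : a' < b' := by omega
    have hble : b' ≤ wl.length := by omega
    set ws' := (wl.drop a').take (b' - a') with hws'
    have hlen : ws'.length = b' - a' := by
      rw [hws', List.length_take, List.length_drop]; omega
    have hne : ws' ≠ [] := by
      intro hcontra; rw [hcontra] at hlen; simp at hlen; omega
    rw [pv_part_len _ hne]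
    have hsplit : wl.take b' = wl.take a' ++ ws' := by
      rw [hws', ← List.take_add]
      congr 1; omega
    have hga : PySem.List.pyGetD (pvPre wl) a 0 = ((wl.take a').map PySem.Str.len).sum := by
      rw [show a = (a' : Int) by omega]
      exact pv_pre_get wl a' (by omega)
    have hgb : PySem.List.pyGetD (pvPre wl) b 0 = ((wl.take b').map PySem.Str.len).sum := by
      rw [show b = (b' : Int) by omega]
      exact pv_pre_get wl b' hble
    unfold pvSegLen
    rw [if_neg (by omega), hga, hgb, hsplit, List.map_append, List.sum_append, hlen]
    have : ((b' - a' : Nat) : Int) = b - a := by omega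
    rw [this]
    ring

theorem pv_match_iff (wl : List String) (sw : List String) (i : Nat) :
    ∀ (j : Nat), i + j + sw.length ≤ wl.length →
    (pvMatchB wl (i : Int) sw (j : Int) = true ↔ (wl.drop (i + j)).take sw.length = sw) := by
  induction sw with
  | nil => intro j h; simp [pvMatchB]
  | cons w rest ih =>
    intro j h
    have hin : i + j < wl.length := by simp only [List.length_cons] at h; omega
    have hget : PySem.List.pyGetD wl ((i : Int) + (j : Int)) "" = wl[i + j] := by
      rw [show (i : Int) + (j : Int) = ((i + j : Nat) : Int) by push_cast; ring,
        PySem.List.pyGetD_natCast]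
      exact List.getD_eq_getElem _ _ hin
    rw [show (wl.drop (i + j)) = wl[i + j] :: wl.drop (i + j + 1) from
      List.drop_eq_getElem_cons hin]
    rw [List.length_cons, List.take_succ_cons]
    rw [pvMatchB, hget]
    have ih' := ih (j + 1) (by simp only [List.length_cons] at h; omega)
    rw [show ((j : Int) + 1) = ((j + 1 : Nat) : Int) by push_cast; ring] at *
    constructor
    · intro hT
      by_cases he : wl[i + j] = w
      · rw [if_pos he] at hT
        rw [show i + (j + 1) = i + j + 1 by omega] at ih'
        exact by rw [he] at *; exact List.cons_eq_cons.mpr ⟨rfl, (ih'.mp hT)⟩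
      · rw [if_neg he] at hT; exact absurd hT (by simp)
    · intro hT
      obtain ⟨h1, h2⟩ := List.cons_eq_cons.mp hT
      rw [if_pos h1, show i + (j + 1) = i + j + 1 by omega] at *
      exact ih'.mpr h2

theorem pv_find_eq (wl sw : List String) (l : List Int)
    (hmem : ∀ i ∈ l, 0 ≤ i ∧ i + sw.length ≤ wl.length) :
    pvFindA wl sw l = pvFindB wl sw l := by
  induction l with
  | nil => rfl
  | cons i rest ih =>
    have h := hmem i (by simp)
    have hiff : (PySem.List.slice wl (some i) (some (i + PySem.List.len sw)) = sw) ↔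
        (pvMatchB wl i sw 0 = true) := by
      have hlen : 0 ≤ i + PySem.List.len sw := by
        simp only [PySem.List.len_eq] at *
        omega
      rw [PySem.List.slice_toNat wl h.1 hlen]
      have htn : (i + PySem.List.len sw).toNat - i.toNat = sw.length := by
        simp only [PySem.List.len_eq] at *
        omega
      rw [htn]
      have := pv_match_iff wl sw i.toNat 0 (by omega)
      rw [show ((i.toNat : Nat) : Int) = i by omega, show ((0 : Nat) : Int) = 0 by simp,
        show i.toNat + 0 = i.toNat by omega] at this
      exact this.symm
    rw [pvFindA, pvFindB]
    split_ifs with h1 h2 h2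
    · rfl
    · exact absurd (hiff.mp h1) h2
    · exact absurd (hiff.mpr h2) h1
    · exact ih (fun x hx => hmem x (by simp [hx]))

theorem pv_sorted_filter (xs : List Int) (p : Int → Bool) :
    PySem.List.sorted (xs.filter p) (fun x => x) false =
      (PySem.List.sorted xs (fun x => x) false).filter p := by
  refine List.Perm.eq_of_pairwise (le := fun (a b : Int) => a ≤ b)
    (fun a b _ _ h1 h2 => by omega)
    (PySem.List.sorted_pairwise _ _)
    (List.Pairwise.filter p (PySem.List.sorted_pairwise _ _))
    ((PySem.List.sorted_perm (xs.filter p) (fun x => x) false).trans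
      ((PySem.List.sorted_perm xs (fun x => x) false).filter p).symm)

def pvPairs (wl : List String) (cuts : List Int) : List String :=
  (cuts.zip cuts.tail).map (fun ab => PySem.Str.join " " (PySem.List.slice wl (some ab.1) (some ab.2)))

theorem pv_zip_tail_append (l : List Int) (x : Int) (h : l ≠ []) :
    (l ++ [x]).zip (l ++ [x]).tail = l.zip l.tail ++ [(l.getLast h, x)] := by
  induction l with
  | nil => exact absurd rfl h
  | cons a t ih =>
    cases t with
    | nil => simp
    | cons b t2 =>
      have ih' := ih (by simp)
      simp only [List.cons_append, List.tail_cons, List.zip_cons_cons] at *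
      rw [ih']
      simp [List.getLast]

theorem pv_pairs_append (wl : List String) (cuts : List Int) (x : Int) (h : cuts ≠ []) :
    pvPairs wl (cuts ++ [x]) =
      pvPairs wl cuts ++ [PySem.Str.join " " (PySem.List.slice wl (some (cuts.getLast h)) (some x))] := by
  unfold pvPairs
  rw [pv_zip_tail_append cuts x h, List.map_append]
  rfl

theorem pv_pairs_length (wl : List String) (cuts : List Int) :
    (pvPairs wl cuts).length = cuts.length - 1 := by
  unfold pvPairs
  rw [List.length_map, List.length_zip, List.length_tail]
  omega

theorem pv_getD_last (l : List Int) (c : Int) (h : l.getLast? = some c) :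
    PySem.List.pyGetD l (-1) 0 = c := by
  have hne : l ≠ [] := by rintro rfl; simp at h
  rw [PySem.List.pyGetD_neg_one l 0 hne]
  rw [List.getLast?_eq_some_getLast hne] at h
  exact Option.some_injective _ h

theorem pv_loop (wl : List String) (hg : ∀ w ∈ wl, pvGood w.toList) (mc se : Int)
    (hse : se < (wl.length : Int)) :
    ∀ (bl : List Int) (cuts : List Int) (cur : Int),
      cuts.getLast? = some cur →
      bl.Pairwise (· ≤ ·) →
      (∀ bw ∈ bl, cur ≤ bw ∧ bw ≤ se) →
      (∀ c ∈ cuts, 0 ≤ c ∧ c ≤ se) →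
      (∀ p ∈ pvPairs wl cuts, PySem.Str.len p ≤ mc) →
      (bl.foldl (pvCutA wl mc) (pvPairs wl cuts, cur)).1 =
          pvPairs wl (bl.foldl (pvStepB (pvPre wl) mc) cuts) ∧
        (bl.foldl (pvStepB (pvPre wl) mc) cuts).getLast? =
          some (bl.foldl (pvCutA wl mc) (pvPairs wl cuts, cur)).2 ∧
        (∀ c ∈ bl.foldl (pvStepB (pvPre wl) mc) cuts, 0 ≤ c ∧ c ≤ se) ∧
        (∀ p ∈ pvPairs wl (bl.foldl (pvStepB (pvPre wl) mc) cuts), PySem.Str.len p ≤ mc) := by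
  intro bl
  induction bl with
  | nil =>
    intro cuts cur hlast _ _ hc hp
    exact ⟨rfl, hlast.symm ▸ hlast, hc, hp⟩
  | cons bw rest ih =>
    intro cuts cur hlast hpw hb hc hp
    have hne : cuts ≠ [] := by rintro rfl; simp at hlast
    have hcurm := hc cur (List.mem_of_getLast? hlast)
    have hbw := hb bw (by simp)
    have hbw_le : bw ≤ (wl.length : Int) := le_of_lt (lt_of_le_of_lt hbw.2 hse)
    have hgood : ∀ w ∈ PySem.List.slice wl (some cur) (some bw), pvGood w.toList :=
      fun w hw => hg w (PySem.List.mem_of_mem_slice _ _ _ hw)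
    have hstrip := pv_part_strip _ hgood
    have hlen := pv_seg wl cur bw hcurm.1 hbw.1 hbw_le
    have hget : PySem.List.pyGetD cuts (-1) 0 = cur := pv_getD_last cuts cur hlast
    have hgl : cuts.getLast hne = cur := by
      rw [List.getLast?_eq_some_getLast hne] at hlast
      exact Option.some_injective _ hlast
    rw [List.foldl_cons, List.foldl_cons]
    by_cases hcond : 15 ≤ pvSegLen (pvPre wl) cur bw ∧ pvSegLen (pvPre wl) cur bw ≤ mc
    · have hA : pvCutA wl mc (pvPairs wl cuts, cur) bw =
          (pvPairs wl (cuts ++ [bw]), bw) := by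
        unfold pvCutA
        simp only [hstrip, hlen]
        rw [if_pos hcond, pv_pairs_append wl cuts bw hne, hgl]
      have hB : pvStepB (pvPre wl) mc cuts bw = cuts ++ [bw] := by
        unfold pvStepB
        rw [hget, if_pos hcond]
      rw [hA, hB]
      apply ih (cuts ++ [bw]) bw List.getLast?_concat
      · exact (List.pairwise_cons.mp hpw).2
      · intro x hx
        exact ⟨(List.pairwise_cons.mp hpw).1 x hx, (hb x (by simp [hx])).2⟩
      · intro c hcm
        rcases List.mem_append.mp hcm with h' | h'
        · exact hc c h'
        · simp at h'; subst h'
          exact ⟨le_trans hcurm.1 hbw.1, hbw.2⟩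
      · intro p hpm
        rw [pv_pairs_append wl cuts bw hne] at hpm
        rcases List.mem_append.mp hpm with h' | h'
        · exact hp p h'
        · simp only [List.mem_singleton] at h'; subst h'
          rw [hgl, hlen]
          exact hcond.2
    · have hA : pvCutA wl mc (pvPairs wl cuts, cur) bw = (pvPairs wl cuts, cur) := by
        unfold pvCutA
        simp only [hstrip, hlen]
        rw [if_neg hcond]
      have hB : pvStepB (pvPre wl) mc cuts bw = cuts := by
        unfold pvStepB
        rw [hget, if_neg hcond]
      rw [hA, hB]
      apply ih cuts cur hlast
      · exact (List.pairwise_cons.mp hpw).2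
      · intro x hx
        exact ⟨le_trans hbw.1 ((List.pairwise_cons.mp hpw).1 x hx), (hb x (by simp [hx])).2⟩
      · exact hc
      · exact hp

theorem pv_foldl_append_ite {α β : Type} (f : α → β) (p : β → Prop) [DecidablePred p] (l : List α) :
    l.foldl (fun acc x => if p (f x) then acc ++ [f x] else acc) [] =
      (l.map f).filter (fun y => decide (p y)) := by
  rw [List.filter_map]
  rw [show (fun (acc : List β) x => if p (f x) then acc ++ [f x] else acc) =
      (fun acc x => if (fun x => decide (p (f x))) x = true then acc ++ [f x] else acc) by
    funext acc x; split_ifs <;> simp_all]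
  rw [PySem.List.foldl_append_if (fun x => decide (p (f x))) f l []]
  rfl

theorem pv_sorted_nil_iff (l : List Int) :
    PySem.List.sorted l (fun x => x) false = [] ↔ l = [] := by
  constructor
  · intro h
    have hp := PySem.List.sorted_perm l (fun x => x) false
    rw [h] at hp
    exact hp.symm.eq_nil
  · intro h; subst h; rfl

theorem pv_findA_mem (wl sw : List String) (l : List Int) (h : pvFindA wl sw l ≠ -1) :
    pvFindA wl sw l ∈ l := by
  induction l with
  | nil => simp [pvFindA] at h
  | cons i rest ih =>
    rw [pvFindA] at h ⊢
    split_ifs at h ⊢ with hi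
    · simp
    · simp [ih h]

theorem pv_join_slice_ne (wl : List String) (hg : ∀ w ∈ wl, pvGood w.toList) (a b : Int)
    (h0 : 0 ≤ a) (hab : a < b) (hb : b ≤ (wl.length : Int)) :
    PySem.Str.join " " (PySem.List.slice wl (some a) (some b)) ≠ "" := by
  intro hcontra
  have := congrArg String.toList hcontra
  rw [pv_join_toList] at this
  have hne : PySem.List.slice wl (some a) (some b) ≠ [] := by
    rw [PySem.List.slice_toNat wl h0 (by omega)]
    intro hnil
    have := congrArg List.length hnil
    rw [List.length_take, List.length_drop] at this
    simp at this
    omega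
  have := pv_join_ne_nil ((PySem.List.slice wl (some a) (some b)).map String.toList)
    (by simpa using hne)
    (by intro cs hcs
        rw [List.mem_map] at hcs
        obtain ⟨w, hw, rfl⟩ := hcs
        have := (hg w (PySem.List.mem_of_mem_slice _ _ _ hw)).1
        simpa using this)
  simp_all

theorem pv_getD_neg2 (l : List Int) (x : Int) (h : l ≠ []) :
    PySem.List.pyGetD (l ++ [x]) (-2) 0 = l.getLast h := by
  have hlen : 2 ≤ (l ++ [x]).length := by
    rw [List.length_append]
    have := List.length_pos_iff.mpr h
    simp
    omega
  rw [show ((-2 : Int)) = -OfNat.ofNat 2 by rfl]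
  rw [PySem.List.pyGetD_neg_ofNat (l ++ [x]) 2 0 (by omega) hlen]
  have hidx : (l ++ [x]).length - 2 = l.length - 1 := by
    rw [List.length_append]; simp
  have hlt : l.length - 1 < l.length := by
    have := List.length_pos_iff.mpr h
    omega
  rw [List.getElem_append_left (by omega), List.getLast_eq_getElem h]
  exact getElem_congr rfl (by rw [List.length_append]; simp) (by omega)

theorem pv_main (sentence : String) (max_chars : Int) (whisper_boundaries : List (List (String × Int))) (all_words : List (List (String × String))) :
    try_split_at_whisper_boundaries sentence max_chars whisper_boundaries all_words =
    try_split_at_whisper_boundaries_alt sentence max_chars whisper_boundaries all_words := by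
  simp only [try_split_at_whisper_boundaries, try_split_at_whisper_boundaries_alt]
  by_cases h0 : whisper_boundaries = [] ∨ all_words = []
  · rw [if_pos h0, if_pos h0]
  rw [if_neg h0, if_neg h0]
  -- word list
  rw [pv_foldl_append_ite pvWordB (fun w => w ≠ "") all_words,
    show pvWordB = pvWordA from rfl]
  set wl := (all_words.map pvWordA).filter (fun w => decide (w ≠ "")) with hwl
  set sw := PySem.Str.split₀ sentence with hsw
  have hgood : ∀ w ∈ wl, pvGood w.toList := by
    intro w hw
    rw [hwl, List.mem_filter] at hw
    obtain ⟨hw1, hw2⟩ := hw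
    rw [List.mem_map] at hw1
    obtain ⟨x, _, rfl⟩ := hw1
    unfold pvWordA
    rw [show (PySem.Str.strip (((PySem.Dict.mk x).get? "word").getD "")).toList =
      PySem.Chars.strip (((PySem.Dict.mk x).get? "word").getD "").toList from PySem.Str.toList_strip _]
    apply pv_good_strip
    rw [← PySem.Str.toList_strip]
    simp only [decide_eq_true_eq] at hw2
    rw [Ne, ← String.toList_eq_nil_iff] at hw2
    exact hw2
  -- best_start
  have hfind : pvFindB wl sw (PySem.List.pyRange 0 (PySem.List.len wl - PySem.List.len sw + 1) 1) =
      pvFindA wl sw (PySem.List.pyRange 0 (PySem.List.len wl - PySem.List.len sw + 1) 1) := by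
    refine (pv_find_eq wl sw _ ?_).symm
    intro i hi
    rw [PySem.List.mem_pyRange_one] at hi
    simp only [PySem.List.len_eq] at hi
    constructor
    · exact hi.1
    · omega
  rw [hfind]
  set bs := pvFindA wl sw (PySem.List.pyRange 0 (PySem.List.len wl - PySem.List.len sw + 1) 1) with hbsdef
  by_cases hbs1 : bs = -1
  · rw [if_pos hbs1, if_pos hbs1]
  rw [if_neg hbs1, if_neg hbs1]
  have hbs_mem : bs ∈ PySem.List.pyRange 0 (PySem.List.len wl - PySem.List.len sw + 1) 1 := by
    rw [hbsdef]
    exact pv_findA_mem wl sw _ (by rw [← hbsdef]; exact hbs1)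
  rw [PySem.List.mem_pyRange_one] at hbs_mem
  simp only [PySem.List.len_eq] at hbs_mem
  have hbs0 : 0 ≤ bs := hbs_mem.1
  have hbsn : bs + (sw.length : Int) ≤ (wl.length : Int) := by omega
  rw [show List.foldl (fun acc t => acc ++ [PySem.List.pyGetD acc (-1) 0 + PySem.Str.len t]) [0] wl
    = pvPre wl from rfl]
  -- boundaries
  rw [pv_foldl_append_ite (fun b => (PySem.Dict.mk b).getD "start_word_idx" (-1))
    (fun x => bs < x ∧ x ≤ bs + PySem.List.len sw - 1) whisper_boundaries]
  rw [← pv_sorted_filter]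
  set ib := ((whisper_boundaries.map (fun b => (PySem.Dict.mk b).getD "start_word_idx" (-1))).filter
    (fun y => decide (bs < y ∧ y ≤ bs + PySem.List.len sw - 1))) with hib
  by_cases hibe : ib = []
  · rw [if_pos hibe, if_pos ((pv_sorted_nil_iff ib).mpr hibe)]
  rw [if_neg hibe, if_neg (fun h => hibe ((pv_sorted_nil_iff ib).mp h))]
  -- main loop
  set se := bs + PySem.List.len sw - 1 with hse_def
  have hse : se < (wl.length : Int) := by
    simp only [hse_def, PySem.List.len_eq]
    omega
  have hib_mem : ∀ x ∈ PySem.List.sorted ib (fun x => x) false, bs < x ∧ x ≤ se := by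
    intro x hx
    have := (PySem.List.sorted_perm ib (fun x => x) false).mem_iff.mp hx
    rw [hib, List.mem_filter] at this
    have := this.2
    simpa using this
  have hbs_se : bs ≤ se := by
    obtain ⟨x, hx⟩ := List.exists_mem_of_ne_nil ib hibe
    have : bs < x ∧ x ≤ se := by
      have hx' := hx
      rw [hib, List.mem_filter] at hx'
      simpa using hx'.2
    omega
  rw [show (([] : List String), bs) = (pvPairs wl [bs], bs) from rfl]
  have hloop := pv_loop wl hgood max_chars se hse (PySem.List.sorted ib (fun x => x) false)
    [bs] bs rfl
    (by simpa using PySem.List.sorted_pairwise ib (fun x => x))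
    (fun bw hbw => ⟨le_of_lt (hib_mem bw hbw).1, (hib_mem bw hbw).2⟩)
    (by intro c hc; simp at hc; subst hc; exact ⟨hbs0, hbs_se⟩)
    (by intro p hp; simp [pvPairs] at hp)
  obtain ⟨hEq1, hLast, hInv, hPle⟩ := hloop
  set F := (PySem.List.sorted ib (fun x => x) false).foldl (pvStepB (pvPre wl) max_chars) [bs] with hF
  set pc := (PySem.List.sorted ib (fun x => x) false).foldl (pvCutA wl max_chars)
    (pvPairs wl [bs], bs) with hpc
  have hFne : F ≠ [] := by
    intro hcontra; rw [hcontra] at hLast; simp at hLast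
  have hglF : F.getLast hFne = pc.2 := by
    rw [List.getLast?_eq_some_getLast hFne] at hLast
    exact Option.some_injective _ hLast
  have hcur_mem : pc.2 ∈ F := hglF ▸ List.getLast_mem hFne
  have hcur := hInv pc.2 hcur_mem
  -- epilogue
  rw [if_pos hcur.2]
  have hsgood : ∀ w ∈ PySem.List.slice wl (some pc.2) (some (se + 1)), pvGood w.toList :=
    fun w hw => hgood w (PySem.List.mem_of_mem_slice _ _ _ hw)
  have hstrip := pv_part_strip _ hsgood
  rw [hstrip]
  have hlastne : PySem.Str.join " " (PySem.List.slice wl (some pc.2) (some (se + 1))) ≠ "" :=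
    pv_join_slice_ne wl hgood pc.2 (se + 1) hcur.1 (by omega) (by omega)
  rw [if_pos hlastne]
  -- partsF = pvPairs wl (F ++ [se+1])
  have hparts : pc.1 ++ [PySem.Str.join " " (PySem.List.slice wl (some pc.2) (some (se + 1)))] =
      pvPairs wl (F ++ [se + 1]) := by
    rw [pv_pairs_append wl F (se + 1) hFne, hglF, hEq1]
  rw [hparts]
  -- index computations on cuts2
  have hgm2 : PySem.List.pyGetD (F ++ [se + 1]) (-2) 0 = pc.2 := by
    rw [pv_getD_neg2 F (se + 1) hFne, hglF]
  have hgm1 : PySem.List.pyGetD (F ++ [se + 1]) (-1) 0 = se + 1 :=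
    pv_getD_last _ _ List.getLast?_concat
  rw [hgm2, hgm1]
  -- last segment length
  have hlen_last : PySem.Str.len (PySem.Str.join " " (PySem.List.slice wl (some pc.2) (some (se + 1)))) =
      pvSegLen (pvPre wl) pc.2 (se + 1) :=
    pv_seg wl pc.2 (se + 1) hcur.1 (by omega) (by omega)
  -- condition equivalence
  have hcond_iff : (1 < (pvPairs wl (F ++ [se + 1])).length ∧
      (pvPairs wl (F ++ [se + 1])).all (fun p => decide (PySem.Str.len p ≤ max_chars)) = true) ↔
      (2 < (F ++ [se + 1]).length ∧ pvSegLen (pvPre wl) pc.2 (se + 1) ≤ max_chars) := by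
    rw [pv_pairs_length, List.length_append]
    have hFpos : 0 < F.length := List.length_pos_iff.mpr hFne
    constructor
    · rintro ⟨hl, ha⟩
      refine ⟨by simp at hl ⊢; omega, ?_⟩
      rw [List.all_eq_true] at ha
      have := ha (PySem.Str.join " " (PySem.List.slice wl (some pc.2) (some (se + 1))))
        (by rw [pv_pairs_append wl F (se + 1) hFne, hglF]; simp)
      rw [← hlen_last]
      simpa using this
    · rintro ⟨hl, hs⟩
      refine ⟨by simp at hl ⊢; omega, ?_⟩
      rw [List.all_eq_true]
      intro p hp
      rw [pv_pairs_append wl F (se + 1) hFne, hglF] at hp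
      rcases List.mem_append.mp hp with h' | h'
      · simpa using hPle p h'
      · simp only [List.mem_singleton] at h'
        subst h'
        simp only [decide_eq_true_eq]
        rw [hlen_last]
        exact hs
  by_cases hcond : 2 < (F ++ [se + 1]).length ∧ pvSegLen (pvPre wl) pc.2 (se + 1) ≤ max_chars
  · rw [if_pos (hcond_iff.mpr hcond), if_pos hcond]
    rw [PySem.List.slice_from_one]
    rfl
  · rw [if_neg (fun h => hcond (hcond_iff.mp h)), if_neg hcond]

-- ===== VERDICT (by name: the statement is the Claim_ definition above) =====
theorem try_split_at_whisper_boundaries_spec : Claim_equal_try_split_at_whisper_boundaries := by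
  intro s mc wb aw _
  unfold Spec_try_split_at_whisper_boundaries
  exact pv_main s mc wb aw
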